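-- pv_equiv track=rewrite | github.com/machine-biophotonics/AI4AMR | final_crispr_model/visualize_mil_crops.py | get_edge_positions
-- ===== SOURCE A (Python) =====
-- def get_edge_positions(image_size, crop_size, grid_size):
--     '''Get positions at edges that don't have full 3x3 neighborhood.'''
--     stride_x = (image_size[0] - crop_size) // (grid_size - 1)
--     stride_y = (image_size[1] - crop_size) // (grid_size - 1)
--
--     edge_positions = []
--     for i in range(grid_size):
--         for j in range(grid_size):
--             left = j * stride_x
--             top = i * stride_y
--
--             can_left = left - stride_x >= 0
--             can_right = left + stride_x + crop_size <= image_size[0]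
--             can_top = top - stride_y >= 0
--             can_bottom = top + stride_y + crop_size <= image_size[1]
--
--             if not (can_left and can_right and can_top and can_bottom):
--                 edge_positions.append((left, top))
--
--     return edge_positions, stride_x, stride_y
-- ===== SOURCE B (Python) =====
-- def get_edge_positions(image_size, crop_size, grid_size):
--     '''Get positions at edges that don't have full 3x3 neighborhood.'''
--     stride_x = (image_size[0] - crop_size) // (grid_size - 1)
--     stride_y = (image_size[1] - crop_size) // (grid_size - 1)
--
--     # Classify columns once: the full column-coordinate list and the sublist of
--     # edge columns.  Then each row contributes a whole precomputed list at once: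
--     # an edge row contributes every column, an interior row only the edge columns.
--     all_cols = [j * stride_x for j in range(grid_size)]
--     edge_cols = [x for x in all_cols
--                  if not (x - stride_x >= 0
--                          and x + stride_x + crop_size <= image_size[0])]
--
--     edge_positions = []
--     for i in range(grid_size):
--         top = i * stride_y
--         if top - stride_y >= 0 and top + stride_y + crop_size <= image_size[1]:
--             edge_positions.extend((x, top) for x in edge_cols)
--         else:
--             edge_positions.extend((x, top) for x in all_cols)
--     return edge_positions, stride_x, stride_y
-- ===== Notes on version B (the rewrite author's own statement) =====
-- stated objective: alternative
-- what changed: B replaces A's per-cell 4-way edge test with a one-pass filter that extracts the edge-column coordinate list once, then builds the result row by row by appending a whole precomputed list per row (all columns for an edge row, only edge columns for an interior row); Pre_ only excludes grid_size == 1, where A raises ZeroDivisionError (B raises there too).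
import Mathlib
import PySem

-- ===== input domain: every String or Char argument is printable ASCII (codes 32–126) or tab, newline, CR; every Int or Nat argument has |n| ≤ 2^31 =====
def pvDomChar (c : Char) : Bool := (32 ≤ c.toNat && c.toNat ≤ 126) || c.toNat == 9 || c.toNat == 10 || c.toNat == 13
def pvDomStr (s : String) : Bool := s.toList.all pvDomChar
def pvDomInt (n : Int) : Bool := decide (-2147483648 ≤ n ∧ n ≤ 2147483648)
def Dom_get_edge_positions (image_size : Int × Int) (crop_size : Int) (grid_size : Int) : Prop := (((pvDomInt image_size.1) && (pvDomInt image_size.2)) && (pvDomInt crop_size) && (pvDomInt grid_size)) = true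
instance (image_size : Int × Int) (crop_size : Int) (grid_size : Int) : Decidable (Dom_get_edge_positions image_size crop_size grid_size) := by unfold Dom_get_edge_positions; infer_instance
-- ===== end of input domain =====

-- B drops the per-cell 4-way test: it filters the column coordinates once into an
-- edge-column sublist and then emits one whole precomputed list per row (all columns
-- for an edge row, only the edge columns for an interior row) — alternative decomposition.

-- ===== PORT A =====
def get_edge_positions (image_size : Int × Int) (crop_size : Int) (grid_size : Int) : (List (Int × Int)) × Int × Int :=
  let stride_x := PySem.Int.floordiv (image_size.1 - crop_size) (grid_size - 1)
  let stride_y := PySem.Int.floordiv (image_size.2 - crop_size) (grid_size - 1)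
  let edge_positions :=
    (PySem.List.pyRange 0 grid_size 1).foldl (fun acc i =>
      (PySem.List.pyRange 0 grid_size 1).foldl (fun acc j =>
        let left := j * stride_x
        let top := i * stride_y
        let can_left := decide (left - stride_x ≥ 0)
        let can_right := decide (left + stride_x + crop_size ≤ image_size.1)
        let can_top := decide (top - stride_y ≥ 0)
        let can_bottom := decide (top + stride_y + crop_size ≤ image_size.2)
        if !(can_left && can_right && can_top && can_bottom) then
          acc ++ [(left, top)]
        else acc) acc) []
  (edge_positions, stride_x, stride_y)

-- ===== PORT B =====
def get_edge_positions_alt (image_size : Int × Int) (crop_size : Int) (grid_size : Int) : (List (Int × Int)) × Int × Int :=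
  let stride_x := PySem.Int.floordiv (image_size.1 - crop_size) (grid_size - 1)
  let stride_y := PySem.Int.floordiv (image_size.2 - crop_size) (grid_size - 1)
  let all_cols := (PySem.List.pyRange 0 grid_size 1).map (fun j => j * stride_x)
  let edge_cols := all_cols.filter (fun x =>
    !(decide (x - stride_x ≥ 0) && decide (x + stride_x + crop_size ≤ image_size.1)))
  let edge_positions :=
    (PySem.List.pyRange 0 grid_size 1).foldl (fun acc i =>
      let top := i * stride_y
      if decide (top - stride_y ≥ 0) && decide (top + stride_y + crop_size ≤ image_size.2) then
        acc ++ edge_cols.map (fun x => (x, top))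
      else
        acc ++ all_cols.map (fun x => (x, top))) []
  (edge_positions, stride_x, stride_y)

-- ===== PRECONDITION & SPEC =====
-- Pre_ excludes exactly grid_size == 1, where A raises ZeroDivisionError on the stride division.
def Pre_get_edge_positions (_image_size : Int × Int) (_crop_size : Int) (grid_size : Int) : Prop := grid_size ≠ 1
instance (image_size : Int × Int) (crop_size : Int) (grid_size : Int) : Decidable (Pre_get_edge_positions image_size crop_size grid_size) := by unfold Pre_get_edge_positions; infer_instance
def pvWitness_get_edge_positions : (Int × Int) × Int × Int := ((8, 8), 2, 3)
def Spec_get_edge_positions (image_size : Int × Int) (crop_size : Int) (grid_size : Int) (out : (List (Int × Int)) × Int × Int) : Prop := out = get_edge_positions_alt image_size crop_size grid_size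
instance (image_size : Int × Int) (crop_size : Int) (grid_size : Int) (out : (List (Int × Int)) × Int × Int) : Decidable (Spec_get_edge_positions image_size crop_size grid_size out) := by unfold Spec_get_edge_positions; infer_instance

-- ===== CLAIM (what is proved, stated in full; the proofs are below) =====
def Claim_equal_get_edge_positions : Prop := ∀ (image_size : Int × Int) (crop_size : Int) (grid_size : Int), Dom_get_edge_positions image_size crop_size grid_size → Pre_get_edge_positions image_size crop_size grid_size → Spec_get_edge_positions image_size crop_size grid_size (get_edge_positions image_size crop_size grid_size)

-- ===== LEMMAS AND PROOFS =====

-- One row of A's nested loop: folding the per-cell test (column predicate P on f j,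
-- row flag r) equals appending the whole (filtered, when r holds) column list at once.
lemma pv_row_fold (f : Int → Int) (P : Int → Bool) (r : Bool) (top : Int)
    (cols : List Int) (acc : List (Int × Int)) :
    cols.foldl (fun a j => if !(P (f j) && r) then a ++ [(f j, top)] else a) acc
      = if r then acc ++ ((cols.map f).filter (fun x => !(P x))).map (fun x => (x, top))
        else acc ++ (cols.map f).map (fun x => (x, top)) := by
  induction cols generalizing acc with
  | nil => cases r <;> simp
  | cons j L ih =>
    simp only [List.foldl_cons, List.map_cons]
    cases r with
    | false =>
      rw [if_pos (by simp), ih]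
      simp [List.append_assoc]
    | true =>
      cases hP : P (f j) with
      | false =>
        rw [if_pos (by simp [hP]), ih]
        simp [hP, List.append_assoc]
      | true =>
        rw [if_neg (by simp [hP]), ih]
        simp [hP]

-- ===== VERDICT (by name: the statement is the Claim_ definition above) =====
theorem get_edge_positions_spec : Claim_equal_get_edge_positions := by
  intro im c g _ _
  unfold Spec_get_edge_positions get_edge_positions get_edge_positions_alt
  simp only
  congr 1
  refine congrFun (congrFun (congrArg List.foldl ?_) []) _
  funext acc i
  have h := pv_row_fold (fun j => j * PySem.Int.floordiv (im.1 - c) (g - 1))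
    (fun x => decide (x - PySem.Int.floordiv (im.1 - c) (g - 1) ≥ 0) &&
              decide (x + PySem.Int.floordiv (im.1 - c) (g - 1) + c ≤ im.1))
    (decide (i * PySem.Int.floordiv (im.2 - c) (g - 1) - PySem.Int.floordiv (im.2 - c) (g - 1) ≥ 0) &&
     decide (i * PySem.Int.floordiv (im.2 - c) (g - 1) + PySem.Int.floordiv (im.2 - c) (g - 1) + c ≤ im.2))
    (i * PySem.Int.floordiv (im.2 - c) (g - 1))
    (PySem.List.pyRange 0 g 1) acc
  simp only [Bool.and_assoc] at h ⊢
  exact h
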